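-- pv_equiv track=rewrite | github.com/zhouchanghai/problem_ans | codility/2015Argon.py | leader0Size
-- ===== SOURCE A (Python) =====
-- def leader0Size(a):
--     # replace 0 with -1
--     # sumPos[i] is the first position that sum(a[0 ... pos]) == i
--     # if i < j then sumPos[i] < sumPos[j]
--     n = len(a)
--     sumPos = [None] * (n+2)
--     sumPos[0] = -1
--     result = [0]*n
--     s = 0
--     for i, x in enumerate(a):
--         if x == 1:
--             s += 1
--             if s >= 0 and sumPos[s] is None:
--                 sumPos[s] = i
--         else:
--             s -= 1
--         if s < 0:
--             result[i] = i+1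
--         elif sumPos[s+1] is not None:
--             result[i] = i - sumPos[s+1]
--     return result
-- ===== SOURCE B (Python) =====
-- def leader0Size(a):
--     n = len(a)
--     # Phase 1: full prefix-sum array P, P[t] = sum over a[0:t] with 0 counted as -1.
--     P = [0] * (n + 1)
--     for t in range(n):
--         P[t + 1] = P[t] + (1 if a[t] == 1 else -1)
--     # Phase 2: for each end index i, scan candidate start points from the left.
--     result = []
--     for i in range(n):
--         if P[i + 1] < 0:
--             result.append(i + 1)
--         else:
--             target = P[i + 1] + 1
--             r = 0
--             for j in range(-1, i):
--                 if P[j + 1] == target: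
--                     r = i - j
--                     break
--             result.append(r)
--     return result
-- ===== Notes on version B (the rewrite author's own statement) =====
-- stated objective: alternative
-- what changed: A builds a first-occurrence table of prefix-sum values on the fly in one pass; B first materialises the whole prefix-sum array and then, for each end index, linearly rescans it from the left for the first matching candidate start (trading A's O(n) online table for a two-phase O(n^2) compute-then-scan structure).
import Mathlib
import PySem

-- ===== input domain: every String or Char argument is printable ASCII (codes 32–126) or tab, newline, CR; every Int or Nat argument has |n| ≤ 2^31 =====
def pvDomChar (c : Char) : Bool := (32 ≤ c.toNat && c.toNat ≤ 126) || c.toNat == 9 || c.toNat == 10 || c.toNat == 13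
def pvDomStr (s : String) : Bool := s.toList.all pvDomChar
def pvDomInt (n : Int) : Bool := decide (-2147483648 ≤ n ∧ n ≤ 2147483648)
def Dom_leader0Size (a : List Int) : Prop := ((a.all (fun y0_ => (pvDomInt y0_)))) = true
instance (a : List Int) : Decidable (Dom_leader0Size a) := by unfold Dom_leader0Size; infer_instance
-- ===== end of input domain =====

-- B replaces A's single-pass online first-occurrence table with a two-phase
-- prefix-array-then-rescan decomposition (alternative algorithm, not faster).

-- ===== PORT A =====
-- A's loop: s is the running sum (0 counted as -1), table is sumPos (first
-- position each nonnegative running sum was reached, entry 0 preseeded to -1),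
-- res accumulates result values (reversed at the end).
def goA : List Int → Nat → Int → List (Option Int) → List Int → List Int
  | [], _, _, _, res => res.reverse
  | x :: rest, i, s, table, res =>
    let s' := if x = 1 then s + 1 else s - 1
    let table' := if x = 1 ∧ 0 ≤ s' ∧ table.getD s'.toNat none = none
                  then table.set s'.toNat (some (i : Int)) else table
    let r : Int :=
      if s' < 0 then (i : Int) + 1
      else
        match table'.getD (s' + 1).toNat none with
        | some p => (i : Int) - p
        | none => 0
    goA rest (i + 1) s' table' (r :: res)

def leader0Size (a : List Int) : List Int :=
  goA a 0 0 ((List.replicate (a.length + 2) (none : Option Int)).set 0 (some (-1))) []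

-- ===== PORT B =====
-- Phase 1 of Source B: the full prefix-sum array, P[t] = sum over a[0:t].
def pvPrefix : Int → List Int → List Int
  | s, [] => [s]
  | s, x :: xs => s :: pvPrefix (s + (if x = 1 then 1 else -1)) xs

-- Inner scan of Source B: j runs over range(-1, i), here t = j + 1 with fuel i + 1.
def pvScanT (P : List Int) (target : Int) (i : Nat) : Nat → Nat → Int
  | _, 0 => 0
  | t, fuel + 1 =>
    if P.getD t 0 = target then (i : Int) + 1 - (t : Int)
    else pvScanT P target i (t + 1) fuel

def leader0Size_alt (a : List Int) : List Int :=
  let P := pvPrefix 0 a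
  (List.range a.length).map (fun i =>
    if P.getD (i + 1) 0 < 0 then (i : Int) + 1
    else pvScanT P (P.getD (i + 1) 0 + 1) i 0 (i + 1))

-- ===== PRECONDITION & SPEC =====
def Spec_leader0Size (a : List Int) (out : List Int) : Prop := out = leader0Size_alt a
instance (a : List Int) (out : List Int) : Decidable (Spec_leader0Size a out) := by unfold Spec_leader0Size; infer_instance

-- ===== CLAIM (what is proved, stated in full; the proofs are below) =====
def Claim_equal_leader0Size : Prop := ∀ (a : List Int), Dom_leader0Size a → Spec_leader0Size a (leader0Size a)

-- ===== LEMMAS AND PROOFS =====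

def pvStep (x : Int) : Int := if x = 1 then 1 else -1

-- first t with Q t = k among t, t+1, …, t+fuel-1
def pvFirstFrom (Q : Nat → Int) (k : Int) : Nat → Nat → Option Nat
  | _, 0 => none
  | t, fuel + 1 => if Q t = k then some t else pvFirstFrom Q k (t + 1) fuel

def pvMap1 (o : Option Nat) : Option Int :=
  match o with
  | some t => some ((t : Int) - 1)
  | none => none

-- the common specification value for result[j]
def pvSpecF (Q : Nat → Int) (j : Nat) : Int :=
  if Q (j + 1) < 0 then (j : Int) + 1
  else
    match pvFirstFrom Q (Q (j + 1) + 1) 0 (j + 1) with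
    | some t => (j : Int) + 1 - (t : Int)
    | none => 0

lemma pvFirstFrom_last (Q : Nat → Int) (k : Int) :
    ∀ (fuel t : Nat), pvFirstFrom Q k t (fuel + 1) =
      match pvFirstFrom Q k t fuel with
      | some r => some r
      | none => if Q (t + fuel) = k then some (t + fuel) else none := by
  intro fuel
  induction fuel with
  | zero =>
    intro t
    simp [pvFirstFrom]
  | succ f ih =>
    intro t
    rw [show pvFirstFrom Q k t (f + 1 + 1) = (if Q t = k then some t else pvFirstFrom Q k (t + 1) (f + 1)) from rfl]
    rw [show pvFirstFrom Q k t (f + 1) = (if Q t = k then some t else pvFirstFrom Q k (t + 1) f) from rfl]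
    by_cases h : Q t = k
    · simp [h]
    · simp only [if_neg h]
      rw [ih (t + 1)]
      have harith : t + 1 + f = t + (f + 1) := by omega
      rw [harith]

lemma pvFirstFrom_none_iff (Q : Nat → Int) (k : Int) :
    ∀ (fuel t : Nat), pvFirstFrom Q k t fuel = none ↔ ∀ m, m < fuel → Q (t + m) ≠ k := by
  intro fuel
  induction fuel with
  | zero => intro t; simp [pvFirstFrom]
  | succ f ih =>
    intro t
    by_cases h : Q t = k
    · simp only [pvFirstFrom, if_pos h]
      constructor
      · intro hc; exact absurd hc (by simp)
      · intro hall; exact absurd h (by simpa using hall 0 (by omega))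
    · simp only [pvFirstFrom, if_neg h]
      rw [ih (t + 1)]
      constructor
      · intro hall m hm
        cases m with
        | zero => simpa using h
        | succ m' =>
          have := hall m' (by omega)
          simpa [Nat.add_comm, Nat.add_assoc, Nat.add_left_comm] using this
      · intro hall m hm
        have := hall (m + 1) (by omega)
        simpa [Nat.add_comm, Nat.add_assoc, Nat.add_left_comm] using this

lemma pvIVT (Q : Nat → Int) (HQ0 : Q 0 = 0) :
    ∀ (i : Nat), (∀ t, t < i → Q (t + 1) = Q t + 1 ∨ Q (t + 1) = Q t - 1) →
      ∀ k : Int, 0 ≤ k → k ≤ Q i → ∃ t', t' ≤ i ∧ Q t' = k := by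
  intro i
  induction i with
  | zero =>
    intro _ k hk0 hkQ
    exact ⟨0, le_refl 0, by omega⟩
  | succ i ih =>
    intro hstep k hk0 hkQ
    by_cases hle : k ≤ Q i
    · obtain ⟨t', ht', hQt'⟩ := ih (fun t ht => hstep t (by omega)) k hk0 hle
      exact ⟨t', by omega, hQt'⟩
    · have := hstep i (by omega)
      have : Q (i + 1) = k := by omega
      exact ⟨i + 1, le_refl _, this⟩

lemma pvQ_le (Q : Nat → Int) (HQ0 : Q 0 = 0) :
    ∀ (i : Nat), (∀ t, t < i → Q (t + 1) = Q t + 1 ∨ Q (t + 1) = Q t - 1) → Q i ≤ (i : Int) := by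
  intro i
  induction i with
  | zero => intro _; simp [HQ0]
  | succ i ih =>
    intro hstep
    have h1 := ih (fun t ht => hstep t (by omega))
    have h2 := hstep i (by omega)
    push_cast
    omega

lemma pvGetD_set_self (l : List (Option Int)) (m : Nat) (v : Option Int) (h : m < l.length) :
    (l.set m v).getD m none = v := by
  rw [List.getD_eq_getElem?_getD, List.getElem?_set_self (by omega)]
  rfl

lemma pvGetD_set_ne (l : List (Option Int)) (m k : Nat) (v : Option Int) (h : m ≠ k) :
    (l.set m v).getD k none = l.getD k none := by
  rw [List.getD_eq_getElem?_getD, List.getD_eq_getElem?_getD, List.getElem?_set_ne h]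

lemma pvGoA_eq (Q : Nat → Int) (n : Nat) (HQ0 : Q 0 = 0) :
    ∀ (xs : List Int) (i : Nat) (s : Int) (table : List (Option Int)) (res : List Int),
      i + xs.length = n →
      s = Q i →
      (∀ t, t < i → Q (t + 1) = Q t + 1 ∨ Q (t + 1) = Q t - 1) →
      (∀ m, m < xs.length → Q (i + m + 1) = Q (i + m) + pvStep (xs.getD m 0)) →
      table.length = n + 2 →
      (∀ k : Nat, k < n + 2 →
        table.getD k none = pvMap1 (pvFirstFrom Q (k : Int) 0 (i + 1))) →
      goA xs i s table res = res.reverse ++ (List.range xs.length).map (fun m => pvSpecF Q (i + m)) := by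
  intro xs
  induction xs with
  | nil =>
    intro i s table res hn hs hstep hxs hlen htab
    simp [goA]
  | cons x rest ih =>
    intro i s table res hn hs hstep hxs hlen htab
    subst hs
    have hx0 := hxs 0 (by simp)
    simp only [List.getD_cons_zero, Nat.add_zero] at hx0
    have hstepx : pvStep x = 1 ∨ pvStep x = -1 := by
      by_cases hx1 : x = 1 <;> simp [pvStep, hx1]
    have hs' : (if x = 1 then Q i + 1 else Q i - 1) = Q (i + 1) := by
      by_cases hx1 : x = 1 <;> simp [pvStep, hx1] at hx0 <;> simp [hx1] <;> omega
    have hstep' : ∀ t, t < i + 1 → Q (t + 1) = Q t + 1 ∨ Q (t + 1) = Q t - 1 := by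
      intro t ht
      rcases Nat.lt_succ_iff_lt_or_eq.mp ht with h | h
      · exact hstep t h
      · subst h
        rcases hstepx with h1 | h1 <;> rw [h1] at hx0 <;> [left; right] <;> omega
    have hin : i + 1 ≤ n := by simp only [List.length_cons] at hn; omega
    have hQle : Q (i + 1) ≤ ((i : Int) + 1) := by
      have := pvQ_le Q HQ0 (i + 1) hstep'
      push_cast at this
      omega
    simp only [goA]
    rw [hs']
    have hlast := pvFirstFrom_last Q
    have hlen' : (if x = 1 ∧ 0 ≤ Q (i + 1) ∧ table.getD (Q (i + 1)).toNat none = none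
        then table.set (Q (i + 1)).toNat (some (i : Int)) else table).length = n + 2 := by
      split <;> simp [hlen]
    have htab' : ∀ k : Nat, k < n + 2 →
        (if x = 1 ∧ 0 ≤ Q (i + 1) ∧ table.getD (Q (i + 1)).toNat none = none
          then table.set (Q (i + 1)).toNat (some (i : Int)) else table).getD k none
          = pvMap1 (pvFirstFrom Q (k : Int) 0 (i + 1 + 1)) := by
      intro k hk
      have hl := hlast (k : Int) (i + 1) 0
      simp only [Nat.zero_add] at hl
      by_cases hc : x = 1 ∧ 0 ≤ Q (i + 1) ∧ table.getD (Q (i + 1)).toNat none = none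
      · rw [if_pos hc]
        obtain ⟨hx1, hpos, hnone⟩ := hc
        have hcast : ((Q (i + 1)).toNat : Int) = Q (i + 1) := Int.toNat_of_nonneg hpos
        by_cases hkeq : k = (Q (i + 1)).toNat
        · subst hkeq
          have hlt : (Q (i + 1)).toNat < table.length := by rw [hlen]; omega
          rw [pvGetD_set_self _ _ _ hlt]
          have hf : pvFirstFrom Q (((Q (i + 1)).toNat : Nat) : Int) 0 (i + 1) = none := by
            have h1 := htab (Q (i + 1)).toNat (by omega)
            rw [hnone] at h1
            cases hff : pvFirstFrom Q (((Q (i + 1)).toNat : Nat) : Int) 0 (i + 1) with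
            | none => rfl
            | some r => rw [hff] at h1; exact absurd h1.symm (by simp [pvMap1])
          rw [hl, hf]
          simp [hcast, pvMap1]
        · rw [pvGetD_set_ne _ _ _ _ (fun he => hkeq he.symm)]
          rw [htab k hk, hl]
          cases hold : pvFirstFrom Q (k : Int) 0 (i + 1) with
          | some r => simp
          | none =>
            have hne : ¬ (Q (i + 1) = (k : Int)) := by
              intro he
              apply hkeq
              omega
            simp [hne, pvMap1]
      · rw [if_neg hc]
        rw [htab k hk, hl]
        cases hold : pvFirstFrom Q (k : Int) 0 (i + 1) with
        | some r => simp
        | none =>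
          have hne : ¬ (Q (i + 1) = (k : Int)) := by
            intro he
            have hpos : 0 ≤ Q (i + 1) := by
              have : (0 : Int) ≤ (k : Int) := Int.natCast_nonneg k
              omega
            have hknat : (Q (i + 1)).toNat = k := by omega
            have hnone_tab : table.getD k none = none := by
              rw [htab k hk, hold]
              rfl
            by_cases hx1 : x = 1
            · exact hc ⟨hx1, hpos, by rw [hknat]; exact hnone_tab⟩
            · have hQi : Q i = (k : Int) + 1 := by
                simp [pvStep, hx1] at hx0
                omega
              obtain ⟨t', ht', hqt⟩ := pvIVT Q HQ0 i hstep (k : Int) (Int.natCast_nonneg k) (by omega)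
              have hnever := (pvFirstFrom_none_iff Q (k : Int) (i + 1) 0).mp hold t' (by omega)
              simp only [Nat.zero_add] at hnever
              exact hnever hqt
          simp [hne, pvMap1]
    have hr : (if Q (i + 1) < 0 then (i : Int) + 1
        else
          match (if x = 1 ∧ 0 ≤ Q (i + 1) ∧ table.getD (Q (i + 1)).toNat none = none
            then table.set (Q (i + 1)).toNat (some (i : Int)) else table).getD (Q (i + 1) + 1).toNat none with
          | some p => (i : Int) - p
          | none => 0) = pvSpecF Q i := by
      by_cases hneg : Q (i + 1) < 0
      · simp [pvSpecF, hneg]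
      · have hpos : 0 ≤ Q (i + 1) := by omega
        have hlt2 : (Q (i + 1) + 1).toNat < n + 2 := by
          have h1 := hQle
          have h2 := hin
          omega
        have hentry := htab' (Q (i + 1) + 1).toNat hlt2
        have hcast2 : (((Q (i + 1) + 1).toNat : Nat) : Int) = Q (i + 1) + 1 := by omega
        rw [hcast2] at hentry
        have hred : pvFirstFrom Q (Q (i + 1) + 1) 0 (i + 1 + 1) = pvFirstFrom Q (Q (i + 1) + 1) 0 (i + 1) := by
          have hl2 := hlast (Q (i + 1) + 1) (i + 1) 0
          simp only [Nat.zero_add] at hl2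
          rw [hl2]
          cases pvFirstFrom Q (Q (i + 1) + 1) 0 (i + 1) with
          | some r => rfl
          | none => simp [show ¬ (Q (i + 1) = Q (i + 1) + 1) by omega]
        rw [hred] at hentry
        rw [hentry]
        simp only [pvSpecF, if_neg hneg]
        cases pvFirstFrom Q (Q (i + 1) + 1) 0 (i + 1) with
        | some t => simp only [pvMap1]; omega
        | none => simp [pvMap1]
    rw [ih (i + 1) (Q (i + 1)) _ _ (by simp only [List.length_cons] at hn; omega) rfl hstep'
      (by
        intro m hm
        have := hxs (m + 1) (by simp; omega)
        simp only [List.getD_cons_succ] at this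
        have harith1 : i + (m + 1) = i + 1 + m := by omega
        have harith2 : i + (m + 1) + 1 = i + 1 + m + 1 := by omega
        rw [harith1] at this
        exact this)
      hlen' htab']
    rw [hr]
    simp only [List.length_cons, List.reverse_cons, List.append_assoc]
    congr 1
    rw [List.range_succ_eq_map, List.map_cons, List.map_map]
    simp only [Nat.add_zero, List.singleton_append]
    congr 1
    apply List.map_congr_left
    intro m _
    simp only [Function.comp]
    congr 1
    omega

lemma pvPrefix_head (s : Int) (a : List Int) : (pvPrefix s a).getD 0 0 = s := by
  cases a <;> simp [pvPrefix]

lemma pvPrefix_succ (a : List Int) :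
    ∀ (s : Int) (t : Nat), t < a.length →
      (pvPrefix s a).getD (t + 1) 0 = (pvPrefix s a).getD t 0 + pvStep (a.getD t 0) := by
  induction a with
  | nil => intro s t ht; simp at ht
  | cons x xs ih =>
    intro s t ht
    cases t with
    | zero =>
      simp only [pvPrefix, List.getD_cons_succ, List.getD_cons_zero, pvPrefix_head, pvStep]
    | succ t' =>
      have := ih (s + (if x = 1 then 1 else -1)) t' (by simpa using ht)
      simpa [pvPrefix] using this

lemma pvScanT_eq (P : List Int) (target : Int) (i : Nat) :
    ∀ (fuel t : Nat), pvScanT P target i t fuel =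
      match pvFirstFrom (fun u => P.getD u 0) target t fuel with
      | some r => (i : Int) + 1 - (r : Int)
      | none => 0 := by
  intro fuel
  induction fuel with
  | zero => intro t; simp [pvScanT, pvFirstFrom]
  | succ f ih =>
    intro t
    rw [show pvScanT P target i t (f + 1) = (if P.getD t 0 = target then (i : Int) + 1 - (t : Int) else pvScanT P target i (t + 1) f) from rfl]
    rw [show pvFirstFrom (fun u => P.getD u 0) target t (f + 1) = (if P.getD t 0 = target then some t else pvFirstFrom (fun u => P.getD u 0) target (t + 1) f) from rfl]
    by_cases h : P.getD t 0 = target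
    · simp only [List.getD_eq_getElem?_getD] at h
      simp [h]
    · simp only [List.getD_eq_getElem?_getD] at h
      simp only [List.getD_eq_getElem?_getD, if_neg h]
      exact ih (t + 1)

-- ===== VERDICT (by name: the statement is the Claim_ definition above) =====
theorem leader0Size_spec : Claim_equal_leader0Size := by
  intro a _
  unfold Spec_leader0Size leader0Size leader0Size_alt
  have key := pvGoA_eq (fun t => (pvPrefix 0 a).getD t 0) a.length (pvPrefix_head 0 a)
    a 0 0 ((List.replicate (a.length + 2) (none : Option Int)).set 0 (some (-1))) []
    (by simp)
    (pvPrefix_head 0 a).symm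
    (by intro t ht; exact absurd ht (Nat.not_lt_zero t))
    (by intro m hm; simpa using pvPrefix_succ a 0 m hm)
    (by simp)
    (by
      intro k hk
      rw [show pvFirstFrom (fun t => (pvPrefix 0 a).getD t 0) (k : Int) 0 1
          = (if (pvPrefix 0 a).getD 0 0 = (k : Int) then some 0 else none) from rfl]
      rw [pvPrefix_head]
      cases k with
      | zero =>
        rw [pvGetD_set_self _ _ _ (by simp)]
        simp [pvMap1]
      | succ k' =>
        rw [if_neg (by omega)]
        rw [pvGetD_set_ne _ _ _ _ (by omega)]
        simp [pvMap1, List.getD_eq_getElem?_getD, List.getElem?_replicate]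
        split <;> rfl)
  rw [key]
  simp only [List.reverse_nil, List.nil_append, Nat.zero_add]
  apply List.map_congr_left
  intro m _
  by_cases hneg : (pvPrefix 0 a)[m + 1]?.getD 0 < 0 <;>
    simp [pvSpecF, hneg, pvScanT_eq, List.getD_eq_getElem?_getD]
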